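-- pv_equiv track=rewrite | github.com/colinjansen/advent_of_code | 2022/day24.py | storm_permutations
-- ===== SOURCE A (Python) =====
-- import math
--
-- def storm_permutations(lines: list[str]) -> dict:
--
--     def parse_storm_information(lines):
--         storms = []
--         h = len(lines)
--         w = len(lines[0])
--         for y in range(h):
--             for x in range(w):
--                 if lines[y][x] == 'v':
--                     storms.append((y, x, 1, 0))
--                     continue
--                 if lines[y][x] == '>':
--                     storms.append((y, x, 0, 1))
--                     continue
--                 if lines[y][x] == '<':
--                     storms.append((y, x, 0, -1))
--                     continue
--                 if lines[y][x] == '^':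
--                     storms.append((y, x, -1, 0))
--                     continue
--         return storms, h, w
--
--     def move_storms(storms: list[tuple], h: int, w: int) -> list[tuple]:
--         new_positions = []
--         for storm in storms:
--             y = storm[0] + storm[2]
--             x = storm[1] + storm[3]
--             if y == 0:
--                 y = h - 2
--             if x == 0:
--                 x = w - 2
--             if y == h - 1:
--                 y = 1
--             if x == w - 1:
--                 x = 1
--             new_positions.append((y, x, storm[2], storm[3]))
--         return new_positions
--
--     def get_all_storm_permutations(lines: list[str]) -> dict:
--         permutations = {}
--         storms, h, w = parse_storm_information(lines)
--         lcm = math.lcm(h-2, w-2)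
--         count = 0
--         while count < lcm:
--             l = []
--             for s in storms:
--                 l.append((s[0], s[1]))
--             permutations[count] = l
--             storms = move_storms(storms, h, w)
--             count += 1
--
--         return permutations, h, w
--
--     return get_all_storm_permutations(lines)
-- ===== SOURCE B (Python) =====
-- import math
--
-- def storm_permutations(lines: list[str]) -> dict:
--     h = len(lines)
--     w = len(lines[0])
--     dirs = {'v': (1, 0), '>': (0, 1), '<': (0, -1), '^': (-1, 0)}
--     storms = []
--     for y in range(h):
--         for x in range(w):
--             c = lines[y][x]
--             if c in dirs:
--                 dy, dx = dirs[c]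
--                 storms.append((y, x, dy, dx))
--     lcm = math.lcm(h - 2, w - 2)
--
--     def axis_track(n, d, p):
--         # positions of one storm along one axis at times 0..lcm-1
--         track = []
--         for _ in range(lcm):
--             track.append(p)
--             p += d
--             if p == 0:
--                 p = n - 2
--             if p == n - 1:
--                 p = 1
--         return track
--
--     tracks = [list(zip(axis_track(h, dy, y), axis_track(w, dx, x)))
--               for y, x, dy, dx in storms]
--     return {t: [tr[t] for tr in tracks] for t in range(lcm)}, h, w
-- ===== Notes on version B (the rewrite author's own statement) =====
-- stated objective: alternative
-- what changed: B decomposes the simulation per storm and per axis: for each storm it computes the independent 1-D y- and x-coordinate trajectories over the whole lcm period and transposes them into per-time snapshots, instead of A's repeatedly advancing the whole storm list one step at a time and recording it.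
import Mathlib
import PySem

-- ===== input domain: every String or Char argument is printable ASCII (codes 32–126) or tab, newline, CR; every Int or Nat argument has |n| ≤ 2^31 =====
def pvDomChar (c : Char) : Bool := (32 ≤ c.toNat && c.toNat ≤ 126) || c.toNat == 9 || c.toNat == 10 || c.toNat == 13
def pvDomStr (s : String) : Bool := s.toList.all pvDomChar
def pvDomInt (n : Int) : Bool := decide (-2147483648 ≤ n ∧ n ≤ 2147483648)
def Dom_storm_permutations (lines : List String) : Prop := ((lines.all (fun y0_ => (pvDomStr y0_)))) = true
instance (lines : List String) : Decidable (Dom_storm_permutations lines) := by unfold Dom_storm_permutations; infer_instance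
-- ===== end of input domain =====

-- B replaces A's step-by-step whole-list simulation by independent per-storm, per-axis trajectories
-- over the full period, transposed into time snapshots (objective: alternative decomposition, same cost).


-- ===== PORT A =====
-- the if-chain classifying one grid cell (inner body of parse_storm_information's loops)
def pvCellA (y x : Int) (c : Char) : Option (Int × Int × Int × Int) :=
  if c = 'v' then some (y, x, 1, 0)
  else if c = '>' then some (y, x, 0, 1)
  else if c = '<' then some (y, x, 0, -1)
  else if c = '^' then some (y, x, -1, 0)
  else none

-- parse_storm_information: for y in range(h), for x in range(w), read lines[y][x]
def pvParseA (lines : List String) : List (Int × Int × Int × Int) × Int × Int :=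
  let h : Int := lines.length
  let w : Int := (((PySem.List.pyGet? lines 0).getD "").toList.length : Int)
  ((PySem.List.pyRange 0 h 1).flatMap fun y =>
      (PySem.List.pyRange 0 w 1).filterMap fun x =>
        match PySem.List.pyGet? lines y with
        | none => none   -- Python raises IndexError here (excluded by Pre_)
        | some line =>
          match PySem.Str.pyGet? line x with
          | none => none -- Python raises IndexError here (excluded by Pre_)
          | some c => pvCellA y x c,
   h, w)

-- move_storms: one synchronous step of every storm
def pvMoveStorms (storms : List (Int × Int × Int × Int)) (h w : Int) : List (Int × Int × Int × Int) :=
  storms.map fun s =>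
    let y := s.1 + s.2.2.1
    let x := s.2.1 + s.2.2.2
    let y := if y = 0 then h - 2 else y
    let x := if x = 0 then w - 2 else x
    let y := if y = h - 1 then 1 else y
    let x := if x = w - 1 then 1 else x
    (y, x, s.2.2.1, s.2.2.2)

-- the 'while count < lcm' loop of get_all_storm_permutations; fuel = lcm - count
def pvLoopA (h w : Int) : Nat → Int → List (Int × Int × Int × Int) → List (Int × List (Int × Int))
  | 0, _, _ => []
  | n + 1, count, storms =>
    (count, storms.map fun s => (s.1, s.2.1)) :: pvLoopA h w n (count + 1) (pvMoveStorms storms h w)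

def storm_permutations (lines : List String) : (List (Int × List (Int × Int))) × Int × Int :=
  let p := pvParseA lines
  let storms := p.1
  let h := p.2.1
  let w := p.2.2
  let lcm : Nat := Nat.lcm (h - 2).natAbs (w - 2).natAbs  -- math.lcm(h-2, w-2)
  (pvLoopA h w lcm 0 storms, h, w)

-- ===== PORT B =====
-- the dict 'dirs' of Source B (distinct literal keys)
def pvDirs : PySem.Dict Char (Int × Int) :=
  PySem.Dict.mk [('v', (1, 0)), ('>', (0, 1)), ('<', (0, -1)), ('^', (-1, 0))]

-- 'if c in dirs: storms.append((y, x, *dirs[c]))'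
def pvCellB (y x : Int) (c : Char) : Option (Int × Int × Int × Int) :=
  (PySem.Dict.get? pvDirs c).map fun d => (y, x, d.1, d.2)

def pvParseB (lines : List String) : List (Int × Int × Int × Int) × Int × Int :=
  let h : Int := lines.length
  let w : Int := (((PySem.List.pyGet? lines 0).getD "").toList.length : Int)
  ((PySem.List.pyRange 0 h 1).flatMap fun y =>
      (PySem.List.pyRange 0 w 1).filterMap fun x =>
        match PySem.List.pyGet? lines y with
        | none => none   -- Python raises IndexError here (excluded by Pre_)
        | some line =>
          match PySem.Str.pyGet? line x with
          | none => none -- Python raises IndexError here (excluded by Pre_)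
          | some c => pvCellB y x c,
   h, w)

-- one 1-D wrap step of a single storm along one axis (body of axis_track's loop)
def pvAxisStep (n d p : Int) : Int :=
  let q := p + d
  let q := if q = 0 then n - 2 else q
  if q = n - 1 then 1 else q

-- axis_track(n, d, p): the storm's coordinate on this axis at times 0 .. lcm-1
def pvAxisTrack (n d : Int) : Nat → Int → List Int
  | 0, _ => []
  | k + 1, p => p :: pvAxisTrack n d k (pvAxisStep n d p)

def storm_permutations_alt (lines : List String) : (List (Int × List (Int × Int))) × Int × Int :=
  let p := pvParseB lines
  let storms := p.1
  let h := p.2.1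
  let w := p.2.2
  let lcm : Nat := Nat.lcm (h - 2).natAbs (w - 2).natAbs  -- math.lcm(h-2, w-2)
  let tracks := storms.map fun s =>
    (pvAxisTrack h s.2.2.1 lcm s.1).zip (pvAxisTrack w s.2.2.2 lcm s.2.1)
  ((List.range lcm).map fun (t : Nat) =>
      ((t : Int), tracks.map fun tr => PySem.List.pyGetD tr (t : Int) ((0 : Int), (0 : Int))),
   h, w)

-- ===== PRECONDITION & SPEC =====
-- Pre_ excludes exactly the inputs where the Python A raises IndexError: the empty list (lines[0])
-- and ragged inputs having a line shorter than the first line (lines[y][x] for x < w).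
def Pre_storm_permutations (lines : List String) : Prop :=
  lines ≠ [] ∧ ∀ l ∈ lines, (lines.headD "").toList.length ≤ l.toList.length
instance (lines : List String) : Decidable (Pre_storm_permutations lines) := by
  unfold Pre_storm_permutations; infer_instance

def pvWitness_storm_permutations : List String := ["#.#", ".>v", "#^#"]

def Spec_storm_permutations (lines : List String) (out : (List (Int × List (Int × Int))) × Int × Int) : Prop := out = storm_permutations_alt lines
instance (lines : List String) (out : (List (Int × List (Int × Int))) × Int × Int) : Decidable (Spec_storm_permutations lines out) := by unfold Spec_storm_permutations; infer_instance

-- ===== CLAIM (what is proved, stated in full; the proofs are below) =====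
def Claim_equal_storm_permutations : Prop := ∀ (lines : List String), Dom_storm_permutations lines → Pre_storm_permutations lines → Spec_storm_permutations lines (storm_permutations lines)

-- ===== LEMMAS AND PROOFS =====

-- B's dict lookup classifies a cell exactly like A's if-chain
theorem pvCell_eq : pvCellB = pvCellA := by
  funext y x c
  simp only [pvCellB, pvCellA, pvDirs, PySem.Dict.get?_mk_cons]
  have e : (PySem.Dict.mk (κ := Char) (ν := Int × Int) []).get? c = none := by
    simp [PySem.Dict.get?]
  rw [e]
  simp only [beq_iff_eq]
  split_ifs <;> subst_vars <;> simp_all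

theorem pvParse_eq (lines : List String) : pvParseA lines = pvParseB lines := by
  unfold pvParseA pvParseB
  rw [pvCell_eq]

-- move_storms acts on each storm independently, axis by axis
def pvStormStep (h w : Int) (s : Int × Int × Int × Int) : Int × Int × Int × Int :=
  (pvAxisStep h s.2.2.1 s.1, pvAxisStep w s.2.2.2 s.2.1, s.2.2.1, s.2.2.2)

theorem pvMoveStorms_eq (storms : List (Int × Int × Int × Int)) (h w : Int) :
    pvMoveStorms storms h w = storms.map (pvStormStep h w) := rfl

theorem pvIterate_map (h w : Int) (i : Nat) (storms : List (Int × Int × Int × Int)) :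
    (fun st => pvMoveStorms st h w)^[i] storms = storms.map ((pvStormStep h w)^[i]) := by
  induction i generalizing storms with
  | zero => simp
  | succ i ih =>
    simp only [Function.iterate_succ_apply]
    rw [ih, pvMoveStorms_eq, List.map_map, ← Function.iterate_succ]

theorem pvStormStep_iterate (h w : Int) (i : Nat) (y x dy dx : Int) :
    (pvStormStep h w)^[i] (y, x, dy, dx) =
      ((pvAxisStep h dy)^[i] y, (pvAxisStep w dx)^[i] x, dy, dx) := by
  induction i generalizing y x with
  | zero => simp
  | succ i ih =>
    simp only [Function.iterate_succ_apply, pvStormStep]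
    exact ih (pvAxisStep h dy y) (pvAxisStep w dx x)

theorem pvLoopA_eq (h w : Int) : ∀ (k : Nat) (c : Int) (storms : List (Int × Int × Int × Int)),
    pvLoopA h w k c storms = (List.range k).map fun (i : Nat) =>
      (c + (i : Int), ((fun st => pvMoveStorms st h w)^[i] storms).map fun s => (s.1, s.2.1)) := by
  intro k
  induction k with
  | zero => intro c storms; rfl
  | succ k ih =>
    intro c storms
    simp only [pvLoopA]
    rw [ih, List.range_succ_eq_map, List.map_cons, List.map_map]
    refine List.cons_eq_cons.mpr ⟨by simp, ?_⟩
    apply List.map_congr_left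
    intro i _
    simp only [Function.comp_apply, Function.iterate_succ_apply]
    refine Prod.ext ?_ rfl
    push_cast; ring

theorem pvAxisTrack_eq (n d : Int) : ∀ (k : Nat) (p : Int),
    pvAxisTrack n d k p = (List.range k).map fun (i : Nat) => (pvAxisStep n d)^[i] p := by
  intro k
  induction k with
  | zero => intro p; rfl
  | succ k ih =>
    intro p
    simp only [pvAxisTrack]
    rw [ih, List.range_succ_eq_map, List.map_cons, List.map_map]
    refine List.cons_eq_cons.mpr ⟨by simp, ?_⟩
    apply List.map_congr_left
    intro i _
    simp only [Function.comp_apply, Function.iterate_succ_apply]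

theorem pvGetD_map_range {α : Type} (f : Nat → α) (k t : Nat) (d : α) (ht : t < k) :
    ((List.range k).map f).getD t d = f t := by
  simp [List.getD, ht]

-- the heart of the equivalence: A's while-loop equals B's transposed per-axis trajectories
theorem pvCore (h w : Int) (L : Nat) (storms : List (Int × Int × Int × Int)) :
    pvLoopA h w L 0 storms = (List.range L).map fun (t : Nat) =>
      ((t : Int), (storms.map fun s =>
          (pvAxisTrack h s.2.2.1 L s.1).zip (pvAxisTrack w s.2.2.2 L s.2.1)).map
        fun tr => PySem.List.pyGetD tr (t : Int) ((0 : Int), (0 : Int))) := by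
  rw [pvLoopA_eq]
  apply List.map_congr_left
  intro t htmem
  have htL : t < L := List.mem_range.mp htmem
  rw [pvIterate_map]
  refine Prod.ext (by simp) ?_
  simp only [List.map_map]
  apply List.map_congr_left
  rintro ⟨y, x, dy, dx⟩ -
  simp only [Function.comp_apply, pvStormStep_iterate, pvAxisTrack_eq, List.zip_map',
    PySem.List.pyGetD_natCast]
  rw [pvGetD_map_range _ L t _ htL]

theorem pvPorts_eq (lines : List String) : storm_permutations lines = storm_permutations_alt lines := by
  simp only [storm_permutations, storm_permutations_alt]
  rw [pvParse_eq]
  exact Prod.ext (pvCore _ _ _ _) rfl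

-- ===== VERDICT (by name: the statement is the Claim_ definition above) =====
theorem storm_permutations_spec : Claim_equal_storm_permutations := by
  intro lines _ _
  unfold Spec_storm_permutations
  exact pvPorts_eq lines
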